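-- pv_equiv track=rewrite | github.com/kupl/PyTER | my_tool/type_analysis/util.py | get_type_list
-- ===== SOURCE A (Python) =====
-- def abstract_type(typ) :
--     '''
--     타입들을 추상화
--     '''
--     structure_list = ['List', 'Dict', 'Set', 'Tuple', 'Union', 'Optional']
--
--     for s in structure_list :
--         if typ.find(s) == 0 :
--             return s
--
--     if '::' in typ : # parent class 떼어내기
--         typ_split = typ.split("::")
--         return abstract_type(typ_split[0]) + "::" + abstract_type(typ_split[1])
--
--     if typ == 'NoneType' :
--         return 'None'
--
--     return typ
--
-- def get_type_list(typ) :
--     abs_typ = abstract_type(typ)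
--
--     if abs_typ == 'Optional' :
--         remain_typ = typ[len('Optional')+1:-1]
--
--         return get_type_list(remain_typ)
--
--     if abs_typ == 'Union' :
--         remain_typ = typ[len('Union')+1:-1]
--
--         union_typs = remain_typ.split('/')
--
--         cand_typ = []
--         for union_typ in union_typs :
--             cand_typ.extend(get_type_list(union_typ))
--
--         return cand_typ
--
--     return [abs_typ]
-- ===== SOURCE B (Python) =====
-- def abstract_type(typ):
--     structure_list = ['List', 'Dict', 'Set', 'Tuple', 'Union', 'Optional']
--     for s in structure_list:
--         if typ.find(s) == 0:
--             return s
--     if '::' in typ: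
--         typ_split = typ.split("::")
--         return abstract_type(typ_split[0]) + "::" + abstract_type(typ_split[1])
--     if typ == 'NoneType':
--         return 'None'
--     return typ
--
--
-- def get_type_list(typ):
--     # iterative worklist instead of recursion: pop from the front, push
--     # unwrapped/split types back to the front so the flatten order is preserved
--     stack = [typ]
--     result = []
--     while stack:
--         t = stack.pop(0)
--         abs_typ = abstract_type(t)
--         if abs_typ == 'Optional':
--             stack.insert(0, t[len('Optional') + 1:-1])
--         elif abs_typ == 'Union':
--             stack = t[len('Union') + 1:-1].split('/') + stack
--         else:
--             result.append(abs_typ)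
--     return result
-- ===== Notes on version B (the rewrite author's own statement) =====
-- stated objective: alternative
-- what changed: Replaced get_type_list's recursion (with a recursive extend loop for Union parts) by a single iterative worklist loop that pops the front type, pushes unwrapped Optional contents / Union parts back onto the front, and appends leaf abstract types to the result; abstract_type is kept as the shared helper.
import Mathlib
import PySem

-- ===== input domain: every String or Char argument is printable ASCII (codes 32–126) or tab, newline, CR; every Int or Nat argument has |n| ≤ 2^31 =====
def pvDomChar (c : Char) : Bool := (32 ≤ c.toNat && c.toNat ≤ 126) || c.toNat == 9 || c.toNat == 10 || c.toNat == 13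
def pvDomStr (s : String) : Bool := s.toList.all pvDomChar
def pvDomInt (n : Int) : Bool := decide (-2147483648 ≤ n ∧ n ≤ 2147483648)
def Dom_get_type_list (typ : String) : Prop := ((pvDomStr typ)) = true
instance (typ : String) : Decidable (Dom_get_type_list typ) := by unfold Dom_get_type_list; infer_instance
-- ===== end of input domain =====

-- B replaces A's recursion by an iterative front-of-stack worklist loop (same cost); abstract_type is the shared module helper.

-- ===== PORT A =====
-- shared module helper abstract_type; the fuel argument is only a totality guard
-- for the '::' recursion (Python recurses on strictly shorter split parts).
def pvStructureList : List (List Char) :=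
  ["List".toList, "Dict".toList, "Set".toList, "Tuple".toList, "Union".toList, "Optional".toList]

def abstractType : Nat → List Char → List Char
  | 0, typ => typ      -- fuel exhausted (unreachable for the Python inputs)
  | fuel + 1, typ =>
    match pvStructureList.find? (fun s => PySem.Chars.find typ s == 0) with
    | some s => s
    | none =>
      if PySem.Chars.isIn "::".toList typ then
        let ts := PySem.Chars.splitOn typ "::".toList
        abstractType fuel (ts.getD 0 []) ++ "::".toList ++ abstractType fuel (ts.getD 1 [])
      else if typ = "NoneType".toList then "None".toList
      else typ

-- sum-of-part-lengths bound for splitOn, used only for termination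
theorem pvSplitOnGo_sum (sep : List Char) (hsep : 1 ≤ sep.length) :
    ∀ (fuel : Nat) (l cur : List Char) (acc : List (List Char)),
      ((PySem.Chars.splitOn.go sep fuel l cur acc).map (fun p => p.length + 1)).sum
        ≤ (acc.map (fun p => p.length + 1)).sum + cur.length + l.length + 1 := by
  intro fuel
  induction fuel with
  | zero =>
    intro l cur acc
    simp [PySem.Chars.splitOn.go]
    omega
  | succ f ih =>
    intro l cur acc
    cases l with
    | nil => simp [PySem.Chars.splitOn.go]; omega
    | cons c rest =>
      rw [PySem.Chars.splitOn.go]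
      split
      · rename_i hpre
        have hlen : sep.length ≤ (c :: rest).length := (List.isPrefixOf_iff_prefix.mp hpre).length_le
        have := ih (List.drop sep.length (c :: rest)) [] (cur.reverse :: acc)
        simp only [List.map_cons, List.sum_cons, List.length_reverse, List.length_nil,
          List.length_drop] at this ⊢
        omega
      · have := ih rest (c :: cur) acc
        simp only [List.length_cons] at this ⊢
        omega

theorem pvSplitOn_sum (s sep : List Char) (hsep : 1 ≤ sep.length) :
    ((PySem.Chars.splitOn s sep).map (fun p => p.length + 1)).sum ≤ s.length + 1 := by
  have := pvSplitOnGo_sum sep hsep (s.length + 1) s [] []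
  simpa [PySem.Chars.splitOn] using this

theorem pvSplitOn_mem_len {s sep p : List Char} (hsep : 1 ≤ sep.length)
    (hp : p ∈ PySem.Chars.splitOn s sep) : p.length ≤ s.length := by
  have hsum := pvSplitOn_sum s sep hsep
  have : p.length + 1 ≤ ((PySem.Chars.splitOn s sep).map (fun q => q.length + 1)).sum :=
    List.le_sum_of_mem (List.mem_map_of_mem hp)
  omega

theorem pvAbstract_nil (fuel : Nat) : abstractType fuel [] = [] := by
  cases fuel <;> simp [abstractType, pvStructureList, PySem.Chars.find, PySem.Chars.find.go,
    PySem.Chars.isIn]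

theorem pvSliceTail_lt (t : List Char) (a : Int) (h : t ≠ []) :
    (PySem.List.slice t (some a) (some (-1))).length < t.length := by
  have hlen : 0 < t.length := List.length_pos_iff.mpr h
  rw [PySem.List.length_slice]
  have h1 : PySem.List.clampIdx t.length (-1) = t.length - 1 := PySem.List.clampIdx_neg_one _
  have h2 : PySem.List.clampIdx t.length (-1) ≤ t.length := by omega
  omega

def getTypeListGo (typ : List Char) : List String :=
  let abs_typ := abstractType (typ.length + 1) typ
  if abs_typ = "Optional".toList then
    getTypeListGo (PySem.Chars.slice typ (some 9) (some (-1)))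
  else if abs_typ = "Union".toList then
    let union_typs := PySem.Chars.splitOn (PySem.Chars.slice typ (some 6) (some (-1))) "/".toList
    union_typs.attach.foldl (fun cand u => cand ++ getTypeListGo u.1) []
  else [String.ofList abs_typ]
termination_by typ.length
decreasing_by
  · rename_i h
    have hne : typ ≠ [] := by
      rintro rfl
      have hx : abstractType (List.length ([] : List Char) + 1) [] = "Optional".toList := h
      rw [pvAbstract_nil] at hx; exact absurd hx (by decide)
    simpa [PySem.Chars.slice_eq_listSlice] using pvSliceTail_lt typ 9 hne
  · rename_i h1 h2
    have hne : typ ≠ [] := by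
      rintro rfl
      have hx : abstractType (List.length ([] : List Char) + 1) [] = "Union".toList := h2
      rw [pvAbstract_nil] at hx; exact absurd hx (by decide)
    have hu := pvSplitOn_mem_len (by decide) u.2
    have := pvSliceTail_lt typ 6 hne
    simp only [PySem.Chars.slice_eq_listSlice] at hu
    omega

def get_type_list (typ : String) : List String := getTypeListGo typ.toList

-- ===== PORT B =====
-- iterative worklist: pop the front type, push unwrapped contents back to the front
def getTypeListLoop (stack : List (List Char)) (result : List String) : List String :=
  match stack with
  | [] => result
  | t :: rest =>
    let abs_typ := abstractType (t.length + 1) t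
    if abs_typ = "Optional".toList then
      getTypeListLoop (PySem.Chars.slice t (some 9) (some (-1)) :: rest) result
    else if abs_typ = "Union".toList then
      getTypeListLoop
        (PySem.Chars.splitOn (PySem.Chars.slice t (some 6) (some (-1))) "/".toList ++ rest) result
    else getTypeListLoop rest (result ++ [String.ofList abs_typ])
termination_by (stack.map (fun s => s.length + 1)).sum
decreasing_by
  · rename_i h
    have hne : t ≠ [] := by
      rintro rfl
      have hx : abstractType (List.length ([] : List Char) + 1) [] = "Optional".toList := h
      rw [pvAbstract_nil] at hx; exact absurd hx (by decide)
    have := pvSliceTail_lt t 9 hne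
    simp only [List.map_cons, List.sum_cons, PySem.Chars.slice_eq_listSlice]
    omega
  · rename_i h0 h1
    have hne : t ≠ [] := by
      rintro rfl
      have hx : abstractType (List.length ([] : List Char) + 1) [] = "Union".toList := h1
      rw [pvAbstract_nil] at hx; exact absurd hx (by decide)
    have hsum := pvSplitOn_sum (PySem.Chars.slice t (some 6) (some (-1))) "/".toList (by decide)
    have := pvSliceTail_lt t 6 hne
    simp only [List.map_append, List.sum_append, List.map_cons, List.sum_cons,
      PySem.Chars.slice_eq_listSlice] at hsum ⊢
    omega
  · simp only [List.map_cons, List.sum_cons]; omega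

def get_type_list_alt (typ : String) : List String := getTypeListLoop [typ.toList] []

-- ===== PRECONDITION & SPEC =====
def Spec_get_type_list (typ : String) (out : List String) : Prop := out = get_type_list_alt typ
instance (typ : String) (out : List String) : Decidable (Spec_get_type_list typ out) := by unfold Spec_get_type_list; infer_instance

-- ===== CLAIM (what is proved, stated in full; the proofs are below) =====
def Claim_equal_get_type_list : Prop := ∀ (typ : String), Dom_get_type_list typ → Spec_get_type_list typ (get_type_list typ)

-- ===== LEMMAS AND PROOFS =====
theorem pvGo_opt {t : List Char} (h : abstractType (t.length + 1) t = "Optional".toList) :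
    getTypeListGo t = getTypeListGo (PySem.Chars.slice t (some 9) (some (-1))) := by
  rw [getTypeListGo.eq_def]; simp [h]

theorem pvGo_uni {t : List Char} (h : abstractType (t.length + 1) t = "Union".toList) :
    getTypeListGo t =
      (PySem.Chars.splitOn (PySem.Chars.slice t (some 6) (some (-1))) "/".toList).flatMap
        getTypeListGo := by
  rw [getTypeListGo.eq_def]
  simp only [h]
  simp [List.flatMap_def]

theorem pvGo_leaf {t : List Char} (h1 : abstractType (t.length + 1) t ≠ "Optional".toList)
    (h2 : abstractType (t.length + 1) t ≠ "Union".toList) :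
    getTypeListGo t = [String.ofList (abstractType (t.length + 1) t)] := by
  rw [getTypeListGo.eq_def, if_neg h1, if_neg h2]

theorem pvLoop_invariant :
    ∀ (stack : List (List Char)) (result : List String),
      getTypeListLoop stack result = result ++ stack.flatMap getTypeListGo := by
  intro stack result
  fun_induction getTypeListLoop stack result with
  | case1 result => simp
  | case2 result t rest abs_typ hopt ih =>
    rw [ih]
    simp only [List.flatMap_cons, pvGo_opt hopt]
  | case3 result t rest abs_typ hopt huni ih =>
    rw [ih]
    simp only [List.flatMap_cons, List.flatMap_append, pvGo_uni huni]
  | case4 result t rest abs_typ hopt huni ih =>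
    rw [ih, List.flatMap_cons, pvGo_leaf hopt huni, List.append_assoc]

-- ===== VERDICT (by name: the statement is the Claim_ definition above) =====
theorem get_type_list_spec : Claim_equal_get_type_list := by
  intro typ _
  unfold Spec_get_type_list get_type_list get_type_list_alt
  rw [pvLoop_invariant]
  simp
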